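-- pv_equiv track=rewrite | github.com/ALbum3270/text-sql | semantic_retrieval.py | _safe_lower_set
-- ===== SOURCE A (Python) =====
-- from typing import Any, Dict, List, Tuple, Optional
--
-- def _safe_lower_set(text: str) -> List[str]:
--     buf: List[str] = []
--     cur: List[str] = []
--     for ch in (text or ""):
--         if ch.isalnum() or ch in ("_", "-", "."):
--             cur.append(ch.lower())
--         else:
--             if cur:
--                 buf.append("".join(cur))
--                 cur = []
--     if cur:
--         buf.append("".join(cur))
--     return buf
-- ===== SOURCE B (Python) =====
-- import re
--
-- def _safe_lower_set(text):
--     return [m.lower() for m in re.findall(r'[\w.\-]+', text or "", flags=re.UNICODE)]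
-- ===== Notes on version B (the rewrite author's own statement) =====
-- stated objective: idiomatic
-- what changed: Replaced the explicit char-by-char accumulator loop with a single regex findall of maximal [\w.-]+ runs, lowercasing each matched token (C-level regex scan instead of a Python-level loop).
import Mathlib
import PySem

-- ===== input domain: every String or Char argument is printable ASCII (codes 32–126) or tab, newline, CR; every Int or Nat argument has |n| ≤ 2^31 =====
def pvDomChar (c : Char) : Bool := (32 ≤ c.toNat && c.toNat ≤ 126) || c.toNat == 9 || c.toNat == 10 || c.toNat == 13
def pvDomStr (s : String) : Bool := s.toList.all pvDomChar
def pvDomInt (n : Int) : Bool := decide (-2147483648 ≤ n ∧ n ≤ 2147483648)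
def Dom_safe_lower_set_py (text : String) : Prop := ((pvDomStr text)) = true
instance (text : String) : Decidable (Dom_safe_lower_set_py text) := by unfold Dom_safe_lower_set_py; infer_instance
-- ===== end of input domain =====

-- B replaces A's explicit char accumulator loop by a maximal-run scan (regex findall of [\w.-]+)
-- followed by lowercasing each token: idiomatic, same cost, return value proved equal on Dom.


-- ===== PORT A =====
-- ch.isalnum() or ch in ("_", "-", ".")
def pvTokChar (c : Char) : Bool :=
  PySem.Chars.isalnum c || c == '_' || c == '-' || c == '.'

-- the for-loop over the characters with state (buf, cur), plus the trailing 'if cur: buf.append' flush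
def pvLoopA : List String → List Char → List Char → List String
  | buf, cur, [] => if cur.isEmpty then buf else buf ++ [String.ofList cur]
  | buf, cur, c :: cs =>
      if pvTokChar c then pvLoopA buf (cur ++ [PySem.Chars.lowerChar c]) cs
      else if cur.isEmpty then pvLoopA buf [] cs
      else pvLoopA (buf ++ [String.ofList cur]) [] cs

def safe_lower_set_py (text : String) : List String :=
  pvLoopA [] [] text.toList   -- 'text or ""' iterates the same characters as text

-- ===== PORT B =====
-- re.findall(r'[\w.-]+', text): the maximal runs of token characters, in order
def pvFindRuns (l : List Char) : List (List Char) :=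
  match l with
  | [] => []
  | c :: cs =>
      if pvTokChar c then (c :: cs.takeWhile pvTokChar) :: pvFindRuns (cs.dropWhile pvTokChar)
      else pvFindRuns cs
termination_by l.length
decreasing_by
  · simp only [List.length_cons]; exact Nat.lt_succ_of_le (List.length_dropWhile_le _ _)
  · simp

-- [m.lower() for m in ...]
def safe_lower_set_py_alt (text : String) : List String :=
  (pvFindRuns text.toList).map (fun r => String.ofList (r.map PySem.Chars.lowerChar))

-- ===== PRECONDITION & SPEC =====
def Spec_safe_lower_set_py (text : String) (out : List String) : Prop := out = safe_lower_set_py_alt text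
instance (text : String) (out : List String) : Decidable (Spec_safe_lower_set_py text out) := by unfold Spec_safe_lower_set_py; infer_instance

-- ===== CLAIM (what is proved, stated in full; the proofs are below) =====
def Claim_equal_safe_lower_set_py : Prop := ∀ (text : String), Dom_safe_lower_set_py text → Spec_safe_lower_set_py text (safe_lower_set_py text)

-- ===== LEMMAS AND PROOFS =====

theorem pvLoopA_buf (cs : List Char) : ∀ (buf : List String) (cur : List Char),
    pvLoopA buf cur cs = buf ++ pvLoopA [] cur cs := by
  induction cs with
  | nil => intro buf cur; simp [pvLoopA]; split <;> simp
  | cons c cs ih =>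
      intro buf cur
      simp only [pvLoopA]
      split
      · rw [ih buf, ih []]
      · split
        · rw [ih buf, ih []]
        · rw [ih (buf ++ [String.ofList cur]), ih ([] ++ [String.ofList cur])]; simp

-- the accumulator loop with pending (already lowered) run 'cur' computes 'cur' glued onto the
-- first maximal run of the remaining characters, followed by the lowered runs of the rest
theorem pvLoopA_runs (cs : List Char) : ∀ (cur : List Char),
    pvLoopA [] cur cs =
      if cur.isEmpty then (pvFindRuns cs).map (fun r => String.ofList (r.map PySem.Chars.lowerChar))
      else String.ofList (cur ++ (cs.takeWhile pvTokChar).map PySem.Chars.lowerChar) ::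
           (pvFindRuns (cs.dropWhile pvTokChar)).map (fun r => String.ofList (r.map PySem.Chars.lowerChar)) := by
  induction cs with
  | nil =>
      intro cur
      by_cases hc : cur.isEmpty
      · simp [pvLoopA, pvFindRuns, hc]
      · simp [pvLoopA, pvFindRuns, hc]
  | cons c cs ih =>
      intro cur
      by_cases h : pvTokChar c
      · rw [pvLoopA, if_pos h, ih]
        rw [pvFindRuns, if_pos h]
        by_cases hc : cur.isEmpty
        · simp_all
        · simp_all [List.takeWhile_cons, h]
      · rw [pvLoopA, if_neg h]
        rw [show pvFindRuns (c :: cs) = pvFindRuns cs by rw [pvFindRuns, if_neg h]]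
        by_cases hc : cur.isEmpty
        · rw [if_pos hc, if_pos hc, ih]; simp
        · rw [if_neg hc, if_neg hc, pvLoopA_buf, ih]
          simp [List.dropWhile_cons, h]
          rw [pvFindRuns, if_neg h]

-- ===== VERDICT (by name: the statement is the Claim_ definition above) =====
theorem safe_lower_set_py_spec : Claim_equal_safe_lower_set_py := by
  intro text _
  unfold Spec_safe_lower_set_py safe_lower_set_py safe_lower_set_py_alt
  rw [pvLoopA_runs]
  simp
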